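-- pv_equiv track=rewrite | github.com/observerss/shared-living | modules/living/utils.py | insert_names
-- ===== SOURCE A (Python) =====
-- def insert_names(names,name,index=0,max_length=65536):
--     if names == '':
--         return name
--     while len(names)+len(name)>max_length:
--         names = names[:names.rfind(',')]
--     if index == 0:
--         return name+','+names
--     elif index == -1:
--         return names+','+name
--     else:
--         names = names.split(',')
--         names.insert(index,name)
--         return ','.join(names)
-- ===== SOURCE B (Python) =====
-- def insert_names(names, name, index=0, max_length=65536):
--     if names == '':
--         return name
--     target = max_length - len(name)
--     if len(names) > target:
--         segs = names.split(',')
--         if len(segs[0]) > target: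
--             # even the first segment alone is too long: char-by-char trim = plain cut
--             names = names[:target]
--         else:
--             kept = [segs[0]]
--             total = len(segs[0])
--             for seg in segs[1:]:
--                 if total + 1 + len(seg) <= target:
--                     kept.append(seg)
--                     total += 1 + len(seg)
--                 else:
--                     break
--             names = ','.join(kept)
--     if index == 0:
--         return name + ',' + names
--     elif index == -1:
--         return names + ',' + name
--     else:
--         segs = names.split(',')
--         segs.insert(index, name)
--         return ','.join(segs)
-- ===== Notes on version B (the rewrite author's own statement) =====
-- stated objective: alternative
-- what changed: Replaces A's repeated backward rfind-and-slice trimming loop by a single forward pass over the comma-split segments that keeps the largest fitting prefix of segments (plain prefix cut when even the first segment exceeds the budget); the insertion branches are unchanged.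
import Mathlib
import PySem

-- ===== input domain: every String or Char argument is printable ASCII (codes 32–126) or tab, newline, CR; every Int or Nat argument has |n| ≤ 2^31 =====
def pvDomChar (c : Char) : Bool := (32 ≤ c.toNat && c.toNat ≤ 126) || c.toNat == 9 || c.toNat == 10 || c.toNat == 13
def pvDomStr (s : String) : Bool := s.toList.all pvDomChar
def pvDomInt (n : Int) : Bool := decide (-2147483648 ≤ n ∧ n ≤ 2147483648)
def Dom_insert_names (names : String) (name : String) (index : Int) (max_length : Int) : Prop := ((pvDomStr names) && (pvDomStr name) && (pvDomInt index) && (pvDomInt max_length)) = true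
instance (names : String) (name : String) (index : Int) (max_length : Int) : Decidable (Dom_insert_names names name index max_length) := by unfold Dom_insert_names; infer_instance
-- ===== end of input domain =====

-- B replaces A's trim loop (repeated rfind/slice from the right) by one forward pass over the
-- comma-split segments; return values agree on Pre_ (outside it A's while loop never terminates).

-- ===== PORT A =====
-- lemmas cited by pvTrimA's decreasing_by (the loop body shortens a nonempty string)
theorem rgo_no (s : List Char) (h : (',':Char) ∉ s) : ∀ j, PySem.Chars.rfind.go s [','] j = -1 := by
  intro j
  induction j with
  | zero =>
    simp only [PySem.Chars.rfind.go]
    rw [if_neg]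
    intro hp
    rw [List.isPrefixOf_iff_prefix] at hp
    exact h (hp.mem (by simp))
  | succ j ih =>
    simp only [PySem.Chars.rfind.go]
    rw [if_neg, ih]
    intro hp
    rw [List.isPrefixOf_iff_prefix] at hp
    exact h (List.mem_of_mem_drop (hp.mem (by simp)))

theorem rfind_no (s : List Char) (h : (',':Char) ∉ s) : PySem.Chars.rfind s [','] = -1 := by
  simp [PySem.Chars.rfind, rgo_no s h]

theorem rgo_last (u v : List Char) (hv : (',':Char) ∉ v) :
    ∀ n, PySem.Chars.rfind.go (u ++ ',' :: v) [','] (u.length + n) = u.length := by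
  intro n
  induction n with
  | zero =>
    cases hu : u.length with
    | zero =>
      have : u = [] := List.length_eq_zero_iff.mp hu
      subst this
      simp [PySem.Chars.rfind.go]
    | succ m =>
      simp only [hu, PySem.Chars.rfind.go]
      rw [if_pos, ← hu]
      rw [List.isPrefixOf_iff_prefix]
      have : (u ++ ',' :: v).drop (m+1) = ',' :: v := by
        rw [← hu, List.drop_append_of_le_length (le_refl _)]
        simp
      rw [this]
      exact ⟨v, rfl⟩
  | succ n ih =>
    have h1 : u.length + (n+1) = (u.length + n) + 1 := by omega
    rw [h1]
    simp only [PySem.Chars.rfind.go]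
    rw [if_neg, ih]
    intro hp
    rw [List.isPrefixOf_iff_prefix] at hp
    have hm : (',':Char) ∈ (u ++ ',' :: v).drop (u.length + n + 1) := hp.mem (by simp)
    have h2 : (u ++ ',' :: v).drop (u.length + (n + 1)) = v.drop n := by
      rw [show u.length + (n+1) = u.length + (1 + n) by omega, ← Nat.add_assoc,
        show u.length + 1 = (u ++ [',']).length by simp,
        show u ++ ',' :: v = (u ++ [',']) ++ v by simp]
      rw [List.drop_append]; simp
    rw [show u.length + n + 1 = u.length + (n+1) by omega, h2] at hm
    exact hv (List.mem_of_mem_drop hm)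

theorem rfind_last (u v : List Char) (hv : (',':Char) ∉ v) :
    PySem.Chars.rfind (u ++ ',' :: v) [','] = u.length := by
  have h : (u ++ ',' :: v).length = u.length + (v.length + 1) := by simp
  simp [PySem.Chars.rfind, h, rgo_last u v hv]

theorem exists_last_comma (s : List Char) (h : (',':Char) ∈ s) :
    ∃ u v, s = u ++ ',' :: v ∧ (',':Char) ∉ v := by
  induction s with
  | nil => cases h
  | cons c r ih =>
    by_cases hr : (',':Char) ∈ r
    · obtain ⟨u, v, rfl, hv⟩ := ih hr
      exact ⟨c :: u, v, rfl, hv⟩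
    · have hc : c = ',' := by
        rcases List.mem_cons.mp h with h1 | h1
        · exact h1.symm
        · exact absurd h1 hr
      exact ⟨[], r, by simp [hc], hr⟩

theorem pvTrimA_step_lt (names : List Char) (hn : ¬ names = []) :
    (PySem.Chars.slice names none (some (PySem.Chars.rfind names [',']))).length < names.length := by
  by_cases hc : (',':Char) ∈ names
  · obtain ⟨u, v, rfl, hv⟩ := exists_last_comma names hc
    rw [rfind_last u v hv]
    simp [PySem.Chars.slice_eq_listSlice, PySem.List.slice_to_natCast]
  · rw [rfind_no names hc]
    simp [PySem.Chars.slice_eq_listSlice, PySem.List.slice_to_neg_one]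
    have : names.length ≠ 0 := fun h0 => hn (List.length_eq_zero_iff.mp h0)
    omega

-- the while loop of A; the inner `names = []` branch is only a totality guard:
-- there the Python loops forever (outside Pre_), so no admitted input reaches it
def pvTrimA (names : List Char) (name : List Char) (max_length : Int) : List Char :=
  if ((names.length : Int) + name.length > max_length) then
    if hn : names = [] then []
    else pvTrimA (PySem.Chars.slice names none (some (PySem.Chars.rfind names [',']))) name max_length
  else names
termination_by names.length
decreasing_by exact pvTrimA_step_lt names hn

def insert_names (names : String) (name : String) (index : Int) (max_length : Int) : String :=
  if names = "" then name
  else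
    let ns := pvTrimA names.toList name.toList max_length
    if index = 0 then String.ofList (name.toList ++ ',' :: ns)
    else if index = -1 then String.ofList (ns ++ ',' :: name.toList)
    else String.ofList (PySem.Chars.join [','] (PySem.List.insert (PySem.Chars.splitOn ns [',']) index name.toList))

-- ===== PORT B =====
-- Source B's for-loop over segs[1:]: greedily keep segments while they fit, break at the first that does not
def pvWalkB : List (List Char) → List (List Char) → Int → Int → List (List Char)
  | [], kept, _, _ => kept
  | seg :: rs, kept, total, target =>
    if total + 1 + (seg.length : Int) ≤ target then
      pvWalkB rs (kept ++ [seg]) (total + 1 + (seg.length : Int)) target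
    else kept

def pvTrimB (names : List Char) (target : Int) : List Char :=
  if (names.length : Int) ≤ target then names
  else
    match PySem.Chars.splitOn names [','] with
    | [] => []   -- unreachable: split(',') always yields at least one piece
    | s0 :: rest =>
      if (s0.length : Int) > target then PySem.Chars.slice names none (some target)
      else PySem.Chars.join [','] (pvWalkB rest [s0] (s0.length : Int) target)

def insert_names_alt (names : String) (name : String) (index : Int) (max_length : Int) : String :=
  if names = "" then name
  else
    let ns := pvTrimB names.toList (max_length - (name.toList.length : Int))
    if index = 0 then String.ofList (name.toList ++ ',' :: ns)
    else if index = -1 then String.ofList (ns ++ ',' :: name.toList)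
    else String.ofList (PySem.Chars.join [','] (PySem.List.insert (PySem.Chars.splitOn ns [',']) index name.toList))

-- ===== PRECONDITION & SPEC =====
-- Pre_ excludes exactly the inputs on which A never returns: with names ≠ '' and len(name) > max_length
-- the while loop trims names down to '' and then loops forever.
def Pre_insert_names (names : String) (name : String) (index : Int) (max_length : Int) : Prop :=
  names = "" ∨ (name.toList.length : Int) ≤ max_length
instance (names : String) (name : String) (index : Int) (max_length : Int) : Decidable (Pre_insert_names names name index max_length) := by unfold Pre_insert_names; infer_instance

def pvWitness_insert_names : String × String × Int × Int := ("alice,bob", "carol", 1, 12)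

def Spec_insert_names (names : String) (name : String) (index : Int) (max_length : Int) (out : String) : Prop := out = insert_names_alt names name index max_length
instance (names : String) (name : String) (index : Int) (max_length : Int) (out : String) : Decidable (Spec_insert_names names name index max_length out) := by unfold Spec_insert_names; infer_instance

-- ===== CLAIM (what is proved, stated in full; the proofs are below) =====
def Claim_equal_insert_names : Prop := ∀ (names : String) (name : String) (index : Int) (max_length : Int), Dom_insert_names names name index max_length → Pre_insert_names names name index max_length → Spec_insert_names names name index max_length (insert_names names name index max_length)

-- ===== LEMMAS AND PROOFS =====

-- proof-side model of str.split(',')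
def pvSegs : List Char → List (List Char)
  | [] => [[]]
  | c :: r => if c = ',' then [] :: pvSegs r else (c :: (pvSegs r).headI) :: (pvSegs r).tail

-- joined length contributed by further segments (',' + segment each)
def pvCost (t : List (List Char)) : Nat := (t.map (fun x => x.length + 1)).sum

theorem segs_ne_nil (s : List Char) : pvSegs s ≠ [] := by
  cases s <;> simp [pvSegs] <;> split <;> simp

theorem segs_cons_headI_tail (s : List Char) : (pvSegs s).headI :: (pvSegs s).tail = pvSegs s := by
  cases h : pvSegs s with
  | nil => exact absurd h (segs_ne_nil s)
  | cons a t => simp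

theorem sgo (fuel : Nat) : ∀ (l cur : List Char) (acc : List (List Char)) (h : l.length < fuel),
    PySem.Chars.splitOn.go [','] fuel l cur acc
      = acc.reverse ++ (cur.reverse ++ (pvSegs l).headI) :: (pvSegs l).tail := by
  induction fuel with
  | zero => intro l cur acc h; omega
  | succ f ih =>
    intro l cur acc h
    cases l with
    | nil => simp [PySem.Chars.splitOn.go, pvSegs]
    | cons c rest =>
      by_cases hc : c = ','
      · subst hc
        have hpre : [','].isPrefixOf (',' :: rest) = true := by simp [List.isPrefixOf]
        simp only [PySem.Chars.splitOn.go, hpre, if_pos]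
        rw [show List.drop [','].length (',' :: rest) = rest from by simp]
        rw [ih rest [] (cur.reverse :: acc) (by simpa using Nat.lt_of_succ_lt_succ h)]
        simp [pvSegs]
        rw [segs_cons_headI_tail]
      · have hpre : [','].isPrefixOf (c :: rest) = false := by
          simp [List.isPrefixOf]
          intro hh; exact absurd hh.symm hc
        simp only [PySem.Chars.splitOn.go, hpre]
        rw [if_neg (by simp [hpre])]
        rw [ih rest (c :: cur) acc (by simpa using Nat.lt_of_succ_lt_succ h)]
        simp [pvSegs, hc]

theorem splitOn_eq_segs (s : List Char) : PySem.Chars.splitOn s [','] = pvSegs s := by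
  rw [PySem.Chars.splitOn, sgo (s.length + 1) s [] [] (by omega)]
  simp [segs_cons_headI_tail]

theorem segs_no_comma (v : List Char) (hv : (',':Char) ∉ v) : pvSegs v = [v] := by
  induction v with
  | nil => rfl
  | cons c r ih =>
    have hc : c ≠ ',' := fun h => hv (by simp [h])
    have hr : (',':Char) ∉ r := fun h => hv (by simp [h])
    simp [pvSegs, hc, ih hr]

theorem segs_split (x r : List Char) (hx : (',':Char) ∉ x) :
    pvSegs (x ++ ',' :: r) = x :: pvSegs r := by
  induction x with
  | nil => simp [pvSegs]
  | cons c t ih =>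
    have hc : c ≠ ',' := fun h => hx (by simp [h])
    have ht : (',':Char) ∉ t := fun h => hx (by simp [h])
    simp [pvSegs, hc, ih ht]

theorem join_cons (x : List Char) (t : List (List Char)) (h : t ≠ []) :
    PySem.Chars.join [','] (x :: t) = x ++ ',' :: PySem.Chars.join [','] t := by
  cases t with
  | nil => exact absurd rfl h
  | cons y r => rw [PySem.Chars.join_cons_cons]; simp

theorem join_segs (s : List Char) : PySem.Chars.join [','] (pvSegs s) = s := by
  induction s with
  | nil => simp [pvSegs, PySem.Chars.join_singleton]
  | cons c r ih =>
    by_cases hc : c = ','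
    · subst hc
      rw [pvSegs, if_pos rfl, join_cons _ _ (segs_ne_nil r)]
      simp [ih]
    · rw [pvSegs, if_neg hc]
      cases h : pvSegs r with
      | nil => exact absurd h (segs_ne_nil r)
      | cons a t =>
        cases t with
        | nil =>
          simp only [List.headI, List.tail]
          rw [PySem.Chars.join_singleton]
          have := ih; rw [h, PySem.Chars.join_singleton] at this
          simp [this]
        | cons b t' =>
          simp only [List.headI, List.tail]
          rw [join_cons _ _ (by simp)]
          have := ih; rw [h, join_cons _ _ (by simp)] at this
          simp [← this]

theorem segs_comma_free (s : List Char) : ∀ x ∈ pvSegs s, (',':Char) ∉ x := by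
  induction s with
  | nil => intro x hx; simp [pvSegs] at hx; simp [hx]
  | cons c r ih =>
    intro x hx
    by_cases hc : c = ','
    · subst hc; rw [pvSegs, if_pos rfl] at hx
      rcases List.mem_cons.mp hx with h | h
      · simp [h]
      · exact ih x h
    · rw [pvSegs, if_neg hc] at hx
      rcases List.mem_cons.mp hx with h | h
      · subst h
        intro hm
        rcases List.mem_cons.mp hm with h | h
        · exact hc h.symm
        · have : (pvSegs r).headI ∈ pvSegs r := by
            rw [← segs_cons_headI_tail r]; simp
          exact ih _ this h
      · have : x ∈ pvSegs r := by
          rw [← segs_cons_headI_tail r]; simp [h]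
        exact ih x this

theorem segs_join (segs : List (List Char)) (h : segs ≠ []) (hc : ∀ x ∈ segs, (',':Char) ∉ x) :
    pvSegs (PySem.Chars.join [','] segs) = segs := by
  induction segs with
  | nil => exact absurd rfl h
  | cons x t ih =>
    cases t with
    | nil => rw [PySem.Chars.join_singleton]; exact segs_no_comma x (hc x (by simp))
    | cons y r =>
      rw [join_cons _ _ (by simp), segs_split _ _ (hc x (by simp))]
      rw [ih (by simp) (fun z hz => hc z (by simp [hz]))]

theorem join_snoc (segs : List (List Char)) (last : List Char) (h : segs ≠ []) :
    PySem.Chars.join [','] (segs ++ [last]) = PySem.Chars.join [','] segs ++ ',' :: last := by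
  induction segs with
  | nil => exact absurd rfl h
  | cons x t ih =>
    cases t with
    | nil => rw [PySem.Chars.join_singleton]; simp [join_cons, PySem.Chars.join_singleton]
    | cons y r =>
      rw [show (x :: y :: r) ++ [last] = x :: ((y :: r) ++ [last]) from rfl]
      rw [join_cons x ((y :: r) ++ [last]) (by simp), ih (by simp),
        join_cons x (y :: r) (by simp)]
      simp

theorem len_join (s0 : List Char) (t : List (List Char)) :
    (PySem.Chars.join [','] (s0 :: t)).length = s0.length + pvCost t := by
  induction t generalizing s0 with
  | nil => rw [PySem.Chars.join_singleton]; simp [pvCost]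
  | cons y r ih =>
    rw [join_cons _ _ (by simp)]
    simp [ih y, pvCost]
    omega

theorem join_head_append (s0 : List Char) (t : List (List Char)) :
    ∃ X, PySem.Chars.join [','] (s0 :: t) = s0 ++ X := by
  cases t with
  | nil => exact ⟨[], by simp [PySem.Chars.join_singleton]⟩
  | cons y r => exact ⟨',' :: PySem.Chars.join [','] (y :: r), by rw [join_cons _ _ (by simp)]⟩

theorem walk_fits (target : Int) : ∀ (r1 r2 kept : List (List Char)) (total : Int),
    total + (pvCost r1 : Int) ≤ target →
    pvWalkB (r1 ++ r2) kept total target = pvWalkB r2 (kept ++ r1) (total + (pvCost r1 : Int)) target := by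
  intro r1
  induction r1 with
  | nil => intro r2 kept total h; simp [pvCost]
  | cons s r1' ih =>
    intro r2 kept total h
    have hcost : (pvCost (s :: r1') : Int) = (1 + s.length : Int) + pvCost r1' := by
      simp [pvCost]; push_cast; ring
    have hstep : total + 1 + (s.length : Int) ≤ target := by
      have : (0:Int) ≤ pvCost r1' := by positivity
      omega
    rw [List.cons_append, pvWalkB, if_pos hstep, ih r2 (kept ++ [s]) _ (by omega)]
    congr 1
    · simp
    · omega

theorem walk_stop (target : Int) (last : List Char) : ∀ (rest kept : List (List Char)) (total : Int),
    target < total + (pvCost rest : Int) + 1 + last.length →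
    pvWalkB (rest ++ [last]) kept total target = pvWalkB rest kept total target := by
  intro rest
  induction rest with
  | nil =>
    intro kept total h
    simp only [List.nil_append, pvWalkB]
    rw [if_neg (by simp [pvCost] at h; omega)]
  | cons s r ih =>
    intro kept total h
    have hcost : (pvCost (s :: r) : Int) = (1 + s.length : Int) + pvCost r := by
      simp [pvCost]; push_cast; ring
    by_cases hs : total + 1 + (s.length : Int) ≤ target
    · rw [List.cons_append, pvWalkB, if_pos hs, pvWalkB, if_pos hs, ih _ _ (by omega)]
    · rw [List.cons_append, pvWalkB, if_neg hs, pvWalkB, if_neg hs]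

theorem trimA_no_comma (nm : List Char) (ml : Int) :
    ∀ (n : Nat) (x : List Char), x.length = n → (',':Char) ∉ x →
      0 ≤ ml - (nm.length : Int) → ml - (nm.length : Int) < x.length →
      pvTrimA x nm ml = x.take (ml - (nm.length : Int)).toNat := by
  intro n
  induction n using Nat.strong_induction_on with
  | _ n ih =>
    intro x hlen hx h0 hgt
    have hxne : x ≠ [] := by
      intro h; subst h; simp at hgt; omega
    rw [pvTrimA, if_pos (by omega), dif_neg hxne, rfind_no x hx]
    have hslice : PySem.Chars.slice x none (some (-1)) = x.dropLast := by
      simp [PySem.Chars.slice_eq_listSlice, PySem.List.slice_to_neg_one]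
    rw [hslice]
    by_cases hdl : ml - (nm.length : Int) < (x.dropLast.length : Int)
    · rw [ih x.dropLast.length (by rw [← hlen]; simp [List.length_dropLast]; omega)
        x.dropLast rfl (fun hm => hx ((List.dropLast_sublist x).mem hm)) h0 hdl]
      rw [List.dropLast_eq_take, List.take_take]
      congr 1
      simp [List.length_dropLast] at hdl
      omega
    · rw [pvTrimA, if_neg (by simp [List.length_dropLast] at hdl ⊢; omega)]
      rw [List.dropLast_eq_take]
      congr 1
      simp [List.length_dropLast] at hdl
      omega

theorem trim_join (nm : List Char) (ml : Int) (h0 : 0 ≤ ml - (nm.length : Int)) :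
    ∀ (segs : List (List Char)), segs ≠ [] → (∀ x ∈ segs, (',':Char) ∉ x) →
      pvTrimA (PySem.Chars.join [','] segs) nm ml
        = pvTrimB (PySem.Chars.join [','] segs) (ml - (nm.length : Int)) := by
  intro segs
  induction segs using List.reverseRecOn with
  | nil => intro h _; exact absurd rfl h
  | append_singleton init last ih =>
    intro _ hcf
    have hlast : (',':Char) ∉ last := hcf last (by simp)
    cases init with
    | nil =>
      simp only [List.nil_append, PySem.Chars.join_singleton]
      by_cases hle : (last.length : Int) ≤ ml - (nm.length : Int)
      · rw [pvTrimA, if_neg (by omega), pvTrimB, if_pos hle]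
      · rw [trimA_no_comma nm ml last.length last rfl hlast h0 (by omega)]
        rw [pvTrimB, if_neg hle, splitOn_eq_segs, segs_no_comma last hlast]
        simp only [if_pos (by omega : (last.length : Int) > ml - (nm.length : Int))]
        simp [PySem.Chars.slice_eq_listSlice, PySem.List.slice_to _ h0]
    | cons s0 t =>
      have hcf' : ∀ x ∈ s0 :: t, (',':Char) ∉ x := fun x hx => hcf x (by
        rcases List.mem_cons.mp hx with h | h
        · simp [h]
        · simp [h])
      have hj := join_snoc (s0 :: t) last (by simp)
      rw [hj]
      have hsegsJ : pvSegs (PySem.Chars.join [','] (s0 :: t)) = s0 :: t :=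
        segs_join (s0 :: t) (by simp) hcf'
      have hsegsS : pvSegs (PySem.Chars.join [','] (s0 :: t) ++ ',' :: last)
          = s0 :: (t ++ [last]) := by
        rw [← hj, segs_join ((s0 :: t) ++ [last]) (by simp) hcf]
        simp
      have hlenJ : (PySem.Chars.join [','] (s0 :: t)).length = s0.length + pvCost t :=
        len_join s0 t
      have hlenS : (PySem.Chars.join [','] (s0 :: t) ++ ',' :: last).length
          = s0.length + pvCost t + 1 + last.length := by
        simp [hlenJ]; omega
      by_cases hsle : ((PySem.Chars.join [','] (s0 :: t) ++ ',' :: last).length : Int)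
          ≤ ml - (nm.length : Int)
      · rw [pvTrimA, if_neg (by omega), pvTrimB, if_pos hsle]
      · have hAstep : pvTrimA (PySem.Chars.join [','] (s0 :: t) ++ ',' :: last) nm ml
            = pvTrimA (PySem.Chars.join [','] (s0 :: t)) nm ml := by
          rw [pvTrimA, if_pos (by omega), dif_neg (by simp),
            rfind_last (PySem.Chars.join [','] (s0 :: t)) last hlast]
          congr 1
          simp only [PySem.Chars.slice_eq_listSlice, PySem.List.slice_to_natCast]
          simp
        rw [hAstep, ih (by simp) hcf']
        -- now equate the two B-trims
        by_cases hs0 : ml - (nm.length : Int) < (s0.length : Int)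
        · -- even the first segment is too long on both sides: both cut at the same prefix
          obtain ⟨X, hX⟩ := join_head_append s0 t
          rw [pvTrimB, if_neg (by omega), splitOn_eq_segs, hsegsJ]
          rw [pvTrimB, if_neg (by push_cast at hsle ⊢; omega), splitOn_eq_segs, hsegsS]
          simp only [if_pos hs0, PySem.Chars.slice_eq_listSlice,
            PySem.List.slice_to _ h0]
          rw [hX, List.append_assoc]
          rw [List.take_append_of_le_length (by omega), List.take_append_of_le_length (by omega)]
        · by_cases hJle : ((PySem.Chars.join [','] (s0 :: t)).length : Int) ≤ ml - (nm.length : Int)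
          · -- the whole of init still fits: the walk consumes all of t and rejects last
            rw [pvTrimB, if_pos hJle]
            rw [pvTrimB, if_neg (by push_cast at hsle ⊢; omega), splitOn_eq_segs, hsegsS]
            simp only [if_neg (by omega : ¬ (s0.length : Int) > ml - (nm.length : Int))]
            rw [walk_fits (ml - (nm.length : Int)) t [last] [s0] (s0.length : Int)
              (by push_cast at hJle; omega)]
            rw [pvWalkB]
            rw [if_neg (by push_cast at hsle ⊢; omega)]
            rw [show ([s0] ++ t) = s0 :: t from rfl]
          · -- init itself is already too long: last is rejected immediately on the long side
            rw [pvTrimB, if_neg hJle, splitOn_eq_segs, hsegsJ]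
            rw [pvTrimB, if_neg (by push_cast at hsle ⊢; omega), splitOn_eq_segs, hsegsS]
            simp only [if_neg (by omega : ¬ (s0.length : Int) > ml - (nm.length : Int))]
            rw [walk_stop (ml - (nm.length : Int)) last t [s0] (s0.length : Int)
              (by push_cast at hsle; omega)]

theorem trim_eq (cs nm : List Char) (ml : Int) (h0 : 0 ≤ ml - (nm.length : Int)) :
    pvTrimA cs nm ml = pvTrimB cs (ml - (nm.length : Int)) := by
  have h := trim_join nm ml h0 (pvSegs cs) (segs_ne_nil cs) (segs_comma_free cs)
  rwa [join_segs cs] at h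

-- ===== VERDICT (by name: the statement is the Claim_ definition above) =====
theorem insert_names_spec : Claim_equal_insert_names := by
  intro names name index max_length _hd hpre
  unfold Spec_insert_names insert_names insert_names_alt
  by_cases hne : names = ""
  · simp [hne]
  · rw [if_neg hne, if_neg hne]
    have h0 : 0 ≤ max_length - (name.toList.length : Int) := by
      rcases hpre with h | h
      · exact absurd h hne
      · omega
    rw [trim_eq names.toList name.toList max_length h0]
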